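-- pv_equiv track=rewrite | github.com/a6njaka/mianatra_itk | load_exo.py | reformat_answer
-- ===== SOURCE A (Python) =====
-- def reformat_answer(text):
--     result = ""
--     n = len(text)
--     for i in range(n):
--         t = text[i]
--         tmp = ""
--         if i != n - 1:
--             tmp = text[i + 1]
--         if tmp != "#" and t != "#":
--             result += f"{t}".lower()
--         elif t != "#":
--             result += f"{t}".upper()
--     return result
-- ===== SOURCE B (Python) =====
-- def reformat_answer(text):
--     result = []
--     prev = None
--     for c in text:
--         if c != '#':
--             result.append(c.lower())
--         elif prev is not None and prev != '#':
--             result[-1] = result[-1].upper()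
--         prev = c
--     return "".join(result)
-- ===== Notes on version B (the rewrite author's own statement) =====
-- stated objective: alternative
-- what changed: Replaces A's forward look-ahead at text[i+1] with a single look-behind pass that tentatively appends each non-'#' char lowercased to a buffer and, on seeing '#', patches the last buffered char to uppercase; string concatenation becomes a list buffer joined once.
import Mathlib
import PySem

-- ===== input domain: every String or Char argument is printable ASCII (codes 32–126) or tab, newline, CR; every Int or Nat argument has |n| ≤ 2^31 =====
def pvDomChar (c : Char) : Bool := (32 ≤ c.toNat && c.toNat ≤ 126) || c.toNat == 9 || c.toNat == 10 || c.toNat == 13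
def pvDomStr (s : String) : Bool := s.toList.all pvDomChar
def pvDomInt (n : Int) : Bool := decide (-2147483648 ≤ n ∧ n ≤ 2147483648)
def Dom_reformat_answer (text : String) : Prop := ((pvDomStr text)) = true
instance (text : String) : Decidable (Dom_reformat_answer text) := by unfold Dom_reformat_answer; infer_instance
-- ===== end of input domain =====

-- B re-implements A's '#'-marker reformatting (look-ahead uppercases the char before each '#')
-- by a look-behind pass that patches the previously buffered char; return values agree on all of Dom.

-- ===== PORT A =====
-- A's loop 'for i in range(n)' reads text[i] and text[i+1]; ported as structural recursion where
-- t is the head and tmp = rest.head? (none plays the role of Python's "" at the last index).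
def reformatA_loop (result : List Char) : List Char → List Char
  | [] => result
  | t :: rest =>
    let tmp : Option Char := rest.head?
    if tmp ≠ some '#' ∧ t ≠ '#' then reformatA_loop (result ++ [t.toLower]) rest
    else if t ≠ '#' then reformatA_loop (result ++ [t.toUpper]) rest
    else reformatA_loop result rest

def reformat_answer (text : String) : String :=
  String.ofList (reformatA_loop [] text.toList)

-- ===== PORT B =====
-- result[-1] = result[-1].upper() : uppercase the last element of the buffer
def pvPatchLast (l : List Char) : List Char :=
  match l.reverse with
  | [] => []
  | x :: r => ((x.toUpper) :: r).reverse

def pvBStep (st : Option Char × List Char) (c : Char) : Option Char × List Char :=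
  if c ≠ '#' then (some c, st.2 ++ [c.toLower])
  else
    (some c,
      match st.1 with
      | some p => if p ≠ '#' then pvPatchLast st.2 else st.2
      | none => st.2)

def reformat_answer_alt (text : String) : String :=
  String.ofList (text.toList.foldl pvBStep (none, [])).2

-- ===== PRECONDITION & SPEC =====
def Spec_reformat_answer (text : String) (out : String) : Prop := out = reformat_answer_alt text
instance (text : String) (out : String) : Decidable (Spec_reformat_answer text out) := by unfold Spec_reformat_answer; infer_instance

-- ===== CLAIM (what is proved, stated in full; the proofs are below) =====
def Claim_equal_reformat_answer : Prop := ∀ (text : String), Dom_reformat_answer text → Spec_reformat_answer text (reformat_answer text)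

-- ===== LEMMAS AND PROOFS =====

-- common look-ahead specification of the emitted characters
def pvJ : List Char → List Char
  | [] => []
  | t :: rest =>
    (if t = '#' then [] else if rest.head? = some '#' then [t.toUpper] else [t.toLower]) ++ pvJ rest

theorem pvPatchLast_append (base : List Char) (x : Char) :
    pvPatchLast (base ++ [x]) = base ++ [x.toUpper] := by
  simp [pvPatchLast]

theorem reformatA_loop_eq (cs : List Char) : ∀ res, reformatA_loop res cs = res ++ pvJ cs := by
  induction cs with
  | nil => intro res; simp [reformatA_loop, pvJ]
  | cons t rest ih =>
    intro res
    by_cases ht : t = '#' <;> by_cases hh : rest.head? = some '#' <;>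
      simp [reformatA_loop, pvJ, ht, hh, ih]

theorem pvB_run (cs : List Char) :
    (∀ acc pv, (pv = none ∨ pv = some '#') →
        (List.foldl pvBStep (pv, acc) cs).2 = acc ++ pvJ cs) ∧
    (∀ acc (p : Char), p ≠ '#' →
        (List.foldl pvBStep (some p, acc ++ [p.toLower]) cs).2 = acc ++ pvJ (p :: cs)) := by
  induction cs with
  | nil =>
    constructor
    · intro acc pv _; simp [pvJ]
    · intro acc p hp; simp [pvJ, hp]
  | cons c rest ih =>
    constructor
    · intro acc pv hpv
      by_cases hc : c = '#'
      · have hstep : pvBStep (pv, acc) c = (some '#', acc) := by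
          rcases hpv with h | h <;> simp [pvBStep, hc, h]
        simp only [List.foldl_cons, hstep]
        rw [ih.1 acc (some '#') (Or.inr rfl)]
        simp [pvJ, hc]
      · have hstep : pvBStep (pv, acc) c = (some c, acc ++ [c.toLower]) := by
          simp [pvBStep, hc]
        simp only [List.foldl_cons, hstep]
        exact ih.2 acc c hc
    · intro acc p hp
      by_cases hc : c = '#'
      · have hstep : pvBStep (some p, acc ++ [p.toLower]) c = (some '#', acc ++ [p.toUpper]) := by
          simp [pvBStep, hc, hp, pvPatchLast_append]
        simp only [List.foldl_cons, hstep]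
        rw [ih.1 (acc ++ [p.toUpper]) (some '#') (Or.inr rfl)]
        simp [pvJ, hc, hp]
      · have hstep : pvBStep (some p, acc ++ [p.toLower]) c
            = (some c, (acc ++ [p.toLower]) ++ [c.toLower]) := by
          simp [pvBStep, hc]
        simp only [List.foldl_cons, hstep]
        rw [ih.2 (acc ++ [p.toLower]) c hc]
        simp [pvJ, hp, hc]

-- ===== VERDICT (by name: the statement is the Claim_ definition above) =====
theorem reformat_answer_spec : Claim_equal_reformat_answer := by
  intro text _
  unfold Spec_reformat_answer reformat_answer reformat_answer_alt
  rw [reformatA_loop_eq, (pvB_run text.toList).1 [] none (Or.inl rfl)]
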